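-- pv_equiv track=rewrite | github.com/fabricenativel/cpge-info | itc/files/C4/ex_kmeans.py | make_partition
-- ===== SOURCE A (Python) =====
-- def distance(d1,d2):
--     s = 0
--     for i in range(len(d1)):
--         s += (d2[i]-d1[i])**2
--     return s
--
-- def get_classe(d,centres):
--     mini = distance(d,centres[0])
--     imini = 0
--     for i in range(1,len(centres)):
--         if distance(d,centres[i])<mini:
--             mini = distance(d,centres[i])
--             imini = i
--     return imini
--
-- def make_partition(data, centres,old_cluster):
--     clusters = [[] for _ in range(len(centres))]
--     moves = 0
--     for d in data:
--         nc = get_classe(d,centres)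
--         clusters[nc].append(d)
--         if d not in old_cluster[nc]:
--             moves +=1
--     return clusters,moves
-- ===== SOURCE B (Python) =====
-- def make_partition(data, centres, old_cluster):
--     def dist2(p, c):
--         return sum((ci - pi) ** 2 for pi, ci in zip(p, c))
--
--     def nearest(p):
--         best, ibest = dist2(p, centres[0]), 0
--         for i in range(1, len(centres)):
--             di = dist2(p, centres[i])
--             if di < best:
--                 best, ibest = di, i
--         return ibest
--
--     assign = [nearest(p) for p in data]
--     clusters = [[p for p, a in zip(data, assign) if a == j]
--                 for j in range(len(centres))]
--     moves = sum(1 for p, a in zip(data, assign) if p not in old_cluster[a])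
--     return clusters, moves
-- ===== Notes on version B (the rewrite author's own statement) =====
-- stated objective: alternative
-- what changed: A's single mutating pass that appends each point into clusters[nc] and bumps the move counter inline is replaced by computing the assignment list once and then building each cluster with a per-class grouping comprehension and the move count with a separate sum over the assignments.
-- outside the precondition, e.g. on make_partition([[0]], [[0], [3]], [[[0]]]): A returns ([[[0]], []], 0), B returns ([[[0]], []], 0)
import Mathlib
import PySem

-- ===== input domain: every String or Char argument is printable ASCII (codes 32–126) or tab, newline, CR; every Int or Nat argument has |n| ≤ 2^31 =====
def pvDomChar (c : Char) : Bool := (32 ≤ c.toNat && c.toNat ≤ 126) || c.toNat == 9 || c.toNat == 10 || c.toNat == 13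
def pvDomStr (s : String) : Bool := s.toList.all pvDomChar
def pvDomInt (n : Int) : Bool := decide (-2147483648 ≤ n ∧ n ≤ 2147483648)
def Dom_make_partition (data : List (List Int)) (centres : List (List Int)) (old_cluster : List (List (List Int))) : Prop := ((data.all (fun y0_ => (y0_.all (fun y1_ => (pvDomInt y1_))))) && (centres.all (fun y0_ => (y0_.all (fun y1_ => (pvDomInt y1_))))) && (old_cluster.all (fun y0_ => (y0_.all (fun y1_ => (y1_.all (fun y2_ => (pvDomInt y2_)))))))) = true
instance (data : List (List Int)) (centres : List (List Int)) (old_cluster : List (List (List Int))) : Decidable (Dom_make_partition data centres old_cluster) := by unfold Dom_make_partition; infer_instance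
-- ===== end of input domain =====

-- B replaces A's single mutating pass with an assignment list + grouping/counting comprehensions (same results; objective: alternative decomposition).

-- ===== PORT A =====
def pyDistance (d1 d2 : List Int) : Int :=
  (PySem.List.pyRange 0 (d1.length : Int) 1).foldl
    (fun s i => s + (PySem.List.pyGetD d2 i 0 - PySem.List.pyGetD d1 i 0) ^ 2) 0

def pyGetClasse (d : List Int) (centres : List (List Int)) : Int :=
  ((PySem.List.pyRange 1 (centres.length : Int) 1).foldl
    (fun s i =>
      if pyDistance d (PySem.List.pyGetD centres i []) < s.1 then
        (pyDistance d (PySem.List.pyGetD centres i []), i)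
      else s)
    (pyDistance d (PySem.List.pyGetD centres 0 []), 0)).2

def make_partition (data : List (List Int)) (centres : List (List Int)) (old_cluster : List (List (List Int))) : List (List (List Int)) × Int :=
  let clusters := (PySem.List.pyRange 0 (centres.length : Int) 1).map (fun _ => ([] : List (List Int)))
  data.foldl
    (fun (s : List (List (List Int)) × Int) d =>
      let nc := pyGetClasse d centres
      (PySem.List.pySetD s.1 nc (PySem.List.pyGetD s.1 nc [] ++ [d]),
       if (PySem.List.pyGetD old_cluster nc []).contains d then s.2 else s.2 + 1))
    (clusters, 0)

-- ===== PORT B =====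
def dist2 (p c : List Int) : Int := ((p.zip c).map (fun q => (q.2 - q.1) ^ 2)).sum

def nearestCentre (centres : List (List Int)) (p : List Int) : Int :=
  ((PySem.List.pyRange 1 (centres.length : Int) 1).foldl
    (fun s i =>
      let di := dist2 p (PySem.List.pyGetD centres i [])
      if di < s.1 then (di, i) else s)
    (dist2 p (PySem.List.pyGetD centres 0 []), 0)).2

def make_partition_alt (data : List (List Int)) (centres : List (List Int)) (old_cluster : List (List (List Int))) : List (List (List Int)) × Int :=
  let assign := data.map (nearestCentre centres)
  let zs := data.zip assign
  ((PySem.List.pyRange 0 (centres.length : Int) 1).map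
     (fun j => (zs.filter (fun q => q.2 == j)).map (fun q => q.1)),
   ((zs.countP (fun q => !((PySem.List.pyGetD old_cluster q.2 []).contains q.1)) : Nat) : Int))

-- ===== PRECONDITION & SPEC =====
-- Pre_ excludes exactly the inputs where A raises (empty `centres` or a centre shorter than a data
-- point, IndexError in `distance`/`get_classe`; `old_cluster` shorter than needed, IndexError at
-- `old_cluster[nc]`), except that the `old_cluster` bound is the closed-form over-approximation
-- `len(old_cluster) ≥ len(centres)`: whether A raises there depends on the computed assignments,
-- so a few inputs on which A happens to return (all assigned classes small) are also excluded.
def Pre_make_partition (data : List (List Int)) (centres : List (List Int)) (old_cluster : List (List (List Int))) : Prop :=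
  data = [] ∨ (centres ≠ [] ∧ centres.length ≤ old_cluster.length ∧
    ∀ d ∈ data, ∀ c ∈ centres, d.length ≤ c.length)
instance (data : List (List Int)) (centres : List (List Int)) (old_cluster : List (List (List Int))) : Decidable (Pre_make_partition data centres old_cluster) := by unfold Pre_make_partition; infer_instance

def pvWitness_make_partition : List (List Int) × List (List Int) × List (List (List Int)) :=
  ([[0, 0], [3, 4]], [[0, 1], [3, 3]], [[[3, 4]], [[0, 0]]])

def Spec_make_partition (data : List (List Int)) (centres : List (List Int)) (old_cluster : List (List (List Int))) (out : List (List (List Int)) × Int) : Prop := out = make_partition_alt data centres old_cluster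
instance (data : List (List Int)) (centres : List (List Int)) (old_cluster : List (List (List Int))) (out : List (List (List Int)) × Int) : Decidable (Spec_make_partition data centres old_cluster out) := by unfold Spec_make_partition; infer_instance

-- ===== CLAIM (what is proved, stated in full; the proofs are below) =====
def Claim_equal_make_partition : Prop := ∀ (data : List (List Int)) (centres : List (List Int)) (old_cluster : List (List (List Int))), Dom_make_partition data centres old_cluster → Pre_make_partition data centres old_cluster → Spec_make_partition data centres old_cluster (make_partition data centres old_cluster)

-- ===== LEMMAS AND PROOFS =====

-- the two distance computations agree when the point is no longer than the centre
lemma dist_fold (p : List Int) : ∀ (c : List Int) (s : Int), p.length ≤ c.length →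
    (List.range p.length).foldl (fun s k => s + (c.getD k 0 - p.getD k 0) ^ 2) s
      = s + ((p.zip c).map (fun q => (q.2 - q.1) ^ 2)).sum := by
  induction p with
  | nil => intro c s _; simp
  | cons x xs ih =>
    intro c s h
    cases c with
    | nil => simp at h
    | cons y ys =>
      simp only [List.length_cons, List.range_succ_eq_map, List.foldl_cons, List.foldl_map,
        List.getD_cons_succ, List.getD_cons_zero, List.zip_cons_cons, List.map_cons, List.sum_cons]
      rw [ih ys _ (by simpa using h)]
      ring

lemma dist_eq (p c : List Int) (h : p.length ≤ c.length) : dist2 p c = pyDistance p c := by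
  unfold dist2 pyDistance
  rw [PySem.List.pyRange_zero_nat, List.foldl_map]
  simp only [PySem.List.pyGetD_natCast]
  rw [dist_fold p c 0 h]
  simp

lemma nearest_eq (p : List Int) (centres : List (List Int))
    (h : ∀ c ∈ centres, p.length ≤ c.length) :
    nearestCentre centres p = pyGetClasse p centres := by
  cases centres with
  | nil => simp [nearestCentre, pyGetClasse, PySem.List.pyRange_one_eq_nil]
  | cons c0 rest =>
    unfold nearestCentre pyGetClasse
    have h0 : dist2 p (PySem.List.pyGetD (c0 :: rest) 0 []) =
        pyDistance p (PySem.List.pyGetD (c0 :: rest) 0 []) := by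
      apply dist_eq
      rw [PySem.List.pyGetD_zero_cons]
      exact h c0 List.mem_cons_self
    rw [h0]
    apply congrArg Prod.snd
    apply PySem.List.foldl_congr_mem
    intro acc x hx
    rw [PySem.List.mem_pyRange_one] at hx
    have hmem : PySem.List.pyGetD (c0 :: rest) x [] ∈ c0 :: rest := by
      apply PySem.List.pyGetD_mem
      constructor
      · simp only [List.length_cons]; omega
      · simpa using hx.2
    have hde := dist_eq p _ (h _ hmem)
    simp only [hde]

-- the running argmin's index is 0 or one of the visited indices
lemma argmin_snd_mem (key : Int → Int) :
    ∀ (l : List Int) (init : Int × Int),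
      (l.foldl (fun s i => if key i < s.1 then (key i, i) else s) init).2 = init.2 ∨
      (l.foldl (fun s i => if key i < s.1 then (key i, i) else s) init).2 ∈ l := by
  intro l
  induction l with
  | nil => intro init; left; rfl
  | cons a t ih =>
    intro init
    simp only [List.foldl_cons]
    rcases ih (if key a < init.1 then (key a, a) else init) with h | h
    · rw [h]; by_cases hc : key a < init.1 <;> simp [hc]
    · right; exact List.mem_cons_of_mem _ h

lemma classe_bounds (d : List Int) (centres : List (List Int)) (hne : centres ≠ []) :
    0 ≤ pyGetClasse d centres ∧ pyGetClasse d centres < (centres.length : Int) := by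
  have hlen : 0 < centres.length := List.length_pos_iff.mpr hne
  unfold pyGetClasse
  rcases argmin_snd_mem (fun i => pyDistance d (PySem.List.pyGetD centres i []))
      (PySem.List.pyRange 1 (centres.length : Int) 1)
      (pyDistance d (PySem.List.pyGetD centres 0 []), 0) with h | h
  · rw [h]
    refine ⟨le_refl 0, ?_⟩
    show (0 : Int) < (centres.length : Int)
    exact_mod_cast hlen
  · rw [PySem.List.mem_pyRange_one] at h
    omega

-- A's loop, characterised: final clusters are the initial ones extended by the per-class
-- filters of the data, and moves counts the points absent from their old cluster.
lemma loopA (centres : List (List Int)) (old_cluster : List (List (List Int))) :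
    ∀ (data : List (List Int)) (cl : List (List (List Int))) (m : Int),
      cl.length = centres.length →
      (∀ d ∈ data, 0 ≤ pyGetClasse d centres ∧ pyGetClasse d centres < (centres.length : Int)) →
      data.foldl
        (fun (s : List (List (List Int)) × Int) d =>
          let nc := pyGetClasse d centres
          (PySem.List.pySetD s.1 nc (PySem.List.pyGetD s.1 nc [] ++ [d]),
           if (PySem.List.pyGetD old_cluster nc []).contains d then s.2 else s.2 + 1))
        (cl, m)
      = ((PySem.List.pyRange 0 (centres.length : Int) 1).map
           (fun j => PySem.List.pyGetD cl j [] ++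
             data.filter (fun d => pyGetClasse d centres == j)),
         m + (data.countP (fun d =>
           !((PySem.List.pyGetD old_cluster (pyGetClasse d centres) []).contains d)) : Int)) := by
  intro data
  induction data with
  | nil =>
    intro cl m hlen _
    simp only [List.foldl_nil, List.filter_nil, List.append_nil, List.countP_nil]
    refine Prod.ext ?_ (by simp)
    show cl = _
    rw [← hlen]
    exact (PySem.List.map_pyGetD_pyRange_zero' cl []).symm
  | cons d rest ih =>
    intro cl m hlen hb
    have hd := hb d List.mem_cons_self
    have hrest : ∀ x ∈ rest, 0 ≤ pyGetClasse x centres ∧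
        pyGetClasse x centres < (centres.length : Int) :=
      fun x hx => hb x (List.mem_cons_of_mem _ hx)
    simp only [List.foldl_cons]
    rw [ih _ _ (by rw [PySem.List.length_pySetD]; exact hlen) hrest]
    obtain ⟨k, hk⟩ : ∃ k : Nat, pyGetClasse d centres = (k : Int) :=
      ⟨(pyGetClasse d centres).toNat, by omega⟩
    refine Prod.ext ?_ ?_
    · show List.map _ _ = List.map _ _
      apply List.map_congr_left
      intro j hj
      rw [PySem.List.mem_pyRange_one] at hj
      obtain ⟨jn, hjn⟩ : ∃ jn : Nat, j = (jn : Int) := ⟨j.toNat, by omega⟩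
      rw [hjn, hk, PySem.List.pyGetD_pySetD_natCast _ _ _ _ _ (by omega)]
      rw [List.filter_cons]
      by_cases he : jn = k
      · subst he
        rw [if_pos rfl, if_pos (by rw [hk]; exact beq_self_eq_true _)]
        rw [List.append_assoc]
        rfl
      · rw [if_neg he,
          if_neg (by rw [hk]; simp only [beq_iff_eq, Int.natCast_inj]; omega)]
    · show (if _ then m else m + 1) + _ = m + _
      rw [List.countP_cons]
      by_cases hc : d ∈ PySem.List.pyGetD old_cluster (pyGetClasse d centres) []
      · simp [hc]
      · simp only [List.elem_eq_contains.symm, List.elem_eq_mem, hc, decide_false,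
          Bool.not_false, if_false, Bool.false_eq_true]
        push_cast
        ring

lemma zip_assign (l : List (List Int)) (g : List Int → Int) :
    l.zip (l.map g) = l.map fun x => (x, g x) := by
  induction l with
  | nil => simp
  | cons x t ih => simp [ih]

-- ===== VERDICT (by name: the statement is the Claim_ definition above) =====
theorem make_partition_spec : Claim_equal_make_partition := by
  intro data centres old_cluster _ hpre
  show make_partition data centres old_cluster = make_partition_alt data centres old_cluster
  rcases hpre with hnil | ⟨hne, _, hdim⟩
  · subst hnil
    simp [make_partition, make_partition_alt]
  · have hbounds : ∀ d ∈ data, 0 ≤ pyGetClasse d centres ∧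
        pyGetClasse d centres < (centres.length : Int) :=
      fun d _ => classe_bounds d centres hne
    have hns : ∀ d ∈ data, nearestCentre centres d = pyGetClasse d centres :=
      fun d hd => nearest_eq d centres (fun c hc => hdim d hd c hc)
    unfold make_partition make_partition_alt
    simp only []
    rw [loopA centres old_cluster data _ 0
      (by simp [PySem.List.length_pyRange_one]) hbounds]
    refine Prod.ext ?_ ?_
    · show List.map _ _ = List.map _ _
      apply List.map_congr_left
      intro j hj
      rw [PySem.List.mem_pyRange_one] at hj
      rw [PySem.List.pyGetD_map_pyRange_of_nonneg _ _ _ _ hj.1 hj.2]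
      rw [List.nil_append, zip_assign, List.filter_map, List.map_map]
      have : ∀ x ∈ data, ((fun q => q.2 == j) ∘ fun d => (d, nearestCentre centres d)) x =
          (fun d => pyGetClasse d centres == j) x := by
        intro x hx
        simp only [Function.comp_apply]
        rw [hns x hx]
      rw [List.filter_congr this,
        show ((fun q : List Int × Int => q.1) ∘ fun d => (d, nearestCentre centres d)) =
          fun d => d from rfl, List.map_id']
    · show 0 + _ = _
      rw [zero_add, zip_assign, List.countP_map]
      congr 1
      apply List.countP_congr
      intro x hx
      simp only [Function.comp_apply]
      rw [hns x hx]
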